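-- pv_equiv track=rewrite | github.com/fp-leic/public | lectures/21/layout3.py | beside
-- ===== SOURCE A (Python) =====
-- from typing import List
--
-- Box = List[str]
--
-- def width(box: Box) -> int:
--     """Get the width a box."""
--     return len(box[0])
--
-- def height(box: Box) -> int:
--     """Get the height of a box."""
--     return len(box)
--
-- def beside(box1:Box, box2:Box) -> Box:
--     """Place box1 to the left of box2."""
--     h1 = height(box1)
--     h2 = height(box2)
--     if h1 < h2:
--         pad1 = width(box1)*' '
--         box1 = box1 + (h2-h1)*[pad1]
--     elif h2 < h1:
--         pad2 = width(box2)*' '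
--         box2 = box2 + (h1-h2)*[pad2]
--     return [row1+row2 for (row1,row2) in zip(box1,box2)]
-- ===== SOURCE B (Python) =====
-- def beside(box1, box2):
--     """Place box1 to the left of box2."""
--     # Stream both boxes through iterators with a None sentinel: no pre-padding
--     # of the shorter box, no zip; one output row is emitted per loop step.
--     it1, it2 = iter(box1), iter(box2)
--     out = []
--     while True:
--         r1 = next(it1, None)
--         r2 = next(it2, None)
--         if r1 is None and r2 is None:
--             return out
--         if r1 is None:
--             r1 = ' ' * len(box1[0])
--         if r2 is None:
--             r2 = ' ' * len(box2[0])
--         out.append(r1 + r2)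
-- ===== Notes on version B (the rewrite author's own statement) =====
-- stated objective: alternative
-- what changed: B replaces A's pad-the-shorter-box-then-zip pipeline by a single sentinel-iterator loop that streams both boxes at once, appending one concatenated row per step and substituting a blank row only when an iterator is exhausted.
import Mathlib
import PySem

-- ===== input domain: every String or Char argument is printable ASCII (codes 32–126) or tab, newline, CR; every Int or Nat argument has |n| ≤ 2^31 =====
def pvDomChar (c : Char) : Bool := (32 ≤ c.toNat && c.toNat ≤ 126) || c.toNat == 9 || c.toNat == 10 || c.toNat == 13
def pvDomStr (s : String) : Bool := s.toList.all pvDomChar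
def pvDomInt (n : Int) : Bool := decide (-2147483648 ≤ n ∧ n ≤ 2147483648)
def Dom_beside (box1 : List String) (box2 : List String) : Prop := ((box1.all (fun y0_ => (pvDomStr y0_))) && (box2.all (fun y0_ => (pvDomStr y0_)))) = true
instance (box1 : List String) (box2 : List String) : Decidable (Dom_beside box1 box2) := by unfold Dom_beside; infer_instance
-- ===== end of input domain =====

-- B replaces A's pad-the-shorter-box-then-zip by a single sentinel-iterator loop streaming
-- both boxes at once; objective: alternative decomposition, same cost.
-- ===== PORT A =====
-- width(box) = len(box[0]); raises IndexError on an empty box — under Pre_ it is only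
-- applied to a non-empty box, where headD "" is exact.
def pyWidth (box : List String) : Nat := (box.headD "").toList.length

def beside (box1 : List String) (box2 : List String) : List String :=
  let h1 := box1.length
  let h2 := box2.length
  let b1 := if h1 < h2 then box1 ++ List.replicate (h2 - h1) (String.ofList (List.replicate (pyWidth box1) ' ')) else box1
  let b2 := if h2 < h1 then box2 ++ List.replicate (h1 - h2) (String.ofList (List.replicate (pyWidth box2) ' ')) else box2
  (b1.zip b2).map (fun p => String.ofList (p.1.toList ++ p.2.toList))

-- ===== PORT B =====
-- The while-loop over the two sentinel iterators: consuming an iterator = structural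
-- recursion on the remaining list; out.append = acc ++ [row]; the blank row
-- ' '*len(box[0]) is taken via headD "", exact under Pre_.
def besideGo (blank1 blank2 : String) (acc : List String) : List String → List String → List String
  | [], [] => acc
  | r1 :: t1, r2 :: t2 => besideGo blank1 blank2 (acc ++ [String.ofList (r1.toList ++ r2.toList)]) t1 t2
  | r1 :: t1, [] => besideGo blank1 blank2 (acc ++ [String.ofList (r1.toList ++ blank2.toList)]) t1 []
  | [], r2 :: t2 => besideGo blank1 blank2 (acc ++ [String.ofList (blank1.toList ++ r2.toList)]) [] t2

def beside_alt (box1 : List String) (box2 : List String) : List String :=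
  besideGo (String.ofList (List.replicate (box1.headD "").toList.length ' '))
           (String.ofList (List.replicate (box2.headD "").toList.length ' '))
           [] box1 box2

-- ===== PRECONDITION & SPEC =====
-- Pre_ excludes exactly the inputs on which both Pythons raise IndexError: one box empty, the other not.
def Pre_beside (box1 : List String) (box2 : List String) : Prop := (box1 = [] ↔ box2 = [])
instance (box1 : List String) (box2 : List String) : Decidable (Pre_beside box1 box2) := by unfold Pre_beside; infer_instance
def pvWitness_beside : List String × List String := (["ab", "cd"], ["x"])

def Spec_beside (box1 : List String) (box2 : List String) (out : List String) : Prop := out = beside_alt box1 box2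
instance (box1 : List String) (box2 : List String) (out : List String) : Decidable (Spec_beside box1 box2 out) := by unfold Spec_beside; infer_instance

-- ===== CLAIM (what is proved, stated in full; the proofs are below) =====
def Claim_equal_beside : Prop := ∀ (box1 : List String) (box2 : List String), Dom_beside box1 box2 → Pre_beside box1 box2 → Spec_beside box1 box2 (beside box1 box2)

-- ===== LEMMAS AND PROOFS =====

-- B's streaming loop computed in closed form: it appends to acc the row-wise concatenation
-- of the two boxes each right-padded with blanks up to the other's length.
lemma besideGo_eq_zip (p1 p2 : String) (acc b1 b2 : List String) :
    besideGo p1 p2 acc b1 b2 =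
    acc ++ ((b1 ++ List.replicate (b2.length - b1.length) p1).zip
     (b2 ++ List.replicate (b1.length - b2.length) p2)).map
      (fun p => String.ofList (p.1.toList ++ p.2.toList)) := by
  induction b1 generalizing b2 acc with
  | nil =>
    induction b2 generalizing acc with
    | nil => simp [besideGo]
    | cons r2 t2 ih2 => simp [besideGo, List.replicate_succ, ih2]
  | cons r1 t1 ih =>
    cases b2 with
    | nil => simp [besideGo, List.replicate_succ, ih]
    | cons r2 t2 => simp [besideGo, ih]

-- ===== VERDICT (by name: the statement is the Claim_ definition above) =====
theorem beside_spec : Claim_equal_beside := by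
  intro box1 box2 _ _
  simp only [Spec_beside, beside, beside_alt]
  rw [besideGo_eq_zip]
  split_ifs with h1 h2 h2
  · omega
  · have : box1.length - box2.length = 0 := by omega
    simp [this, pyWidth]
  · have : box2.length - box1.length = 0 := by omega
    simp [this, pyWidth]
  · have e1 : box1.length - box2.length = 0 := by omega
    have e2 : box2.length - box1.length = 0 := by omega
    simp [e1, e2]
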